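-- pv_equiv track=rewrite | github.com/Piero24/TelegramBot-AmazonOffers | src/messages/message.py | title_generator
-- ===== SOURCE A (Python) =====
-- def title_generator(
--     title: str,
--     brand: str = "",
--     asin: str = ""
-- ) -> tuple[str, list[str]]:
--     """Generates bullet points from a product title.
--
--     Args:
--         title (str): The title of the product.
--         brand (str): The brand of the product.
--         asin (str): The ASIN of the product.
--
--     Returns:
--         tuple[str, list[str]]: A tuple containing the processed
--             product title and a list of bullet points extracted
--             from the title.
--     """
--     ##
--     ## As is mentioned in the readme file, the code in this function can be really
--     ## different based on your preference.
--     ##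
--     ## You must personalize this function based on your needs.
--     ##
--     ## If you don't modify this function it automatically selects a short
--     ## sub string as title and return the rest so you can use it for bullet points.
--     ##
--     ##
--
--     title_list = title.replace("(", "")
--     title_list = title_list.replace(")", "")
--     title_list = title_list.replace("[", "")
--     title_list = title_list.replace("]", "")
--
--     title_list = title_list.split(", ")
--     new_title = title_list[0]
--
--     while (len(new_title) < 25) and (len(title_list) > 1):
--         new_title = new_title + " - " + title_list[1]
--         title_list.pop(1)
--
--     bullets_from_title = title_list[1:]
--     return new_title, bullets_from_title
-- ===== SOURCE B (Python) =====
-- def title_generator(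
--     title: str,
--     brand: str = "",
--     asin: str = ""
-- ) -> tuple[str, list[str]]:
--     cleaned = title
--     for ch in "()[]":
--         cleaned = cleaned.replace(ch, "")
--     segments = cleaned.split(", ")
--     # Find the cutoff: how many extra segments get merged into the title.
--     # Each merge adds the 3-char separator plus the segment itself.
--     m = 0
--     acc = len(segments[0])
--     while acc < 25 and m + 1 < len(segments):
--         acc += 3 + len(segments[m + 1])
--         m += 1
--     return " - ".join(segments[:m + 1]), segments[m + 1:]
-- ===== Notes on version B (the rewrite author's own statement) =====
-- stated objective: simpler
-- what changed: Instead of A's mutating while-loop that repeatedly concatenates strings and pops title_list[1], B first computes the cutoff index with a plain integer length counter (each merge adds the segment length plus 3 for the separator) and then builds the title with a single join and the bullets with a single slice, with no list mutation.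
import Mathlib
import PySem

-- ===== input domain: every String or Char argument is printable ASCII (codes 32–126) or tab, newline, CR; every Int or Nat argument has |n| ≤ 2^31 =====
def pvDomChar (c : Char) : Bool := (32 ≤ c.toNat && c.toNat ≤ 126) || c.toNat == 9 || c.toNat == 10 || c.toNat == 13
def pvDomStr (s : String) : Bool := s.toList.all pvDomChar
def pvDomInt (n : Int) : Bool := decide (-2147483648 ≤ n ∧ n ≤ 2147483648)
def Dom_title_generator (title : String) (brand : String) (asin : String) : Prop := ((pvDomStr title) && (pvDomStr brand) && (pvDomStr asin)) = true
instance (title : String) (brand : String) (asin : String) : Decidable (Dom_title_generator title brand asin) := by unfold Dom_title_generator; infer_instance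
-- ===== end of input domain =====

-- B replaces A's mutating merge loop (string concatenation + pop(1)) by an integer
-- length counter that finds the cutoff, then one join and one slice (objective: simpler).
-- ===== PORT A =====
-- while (len(new_title) < 25) and (len(title_list) > 1): new_title += " - " + title_list[1]; title_list.pop(1)
def tgLoopA (nt : List Char) : List (List Char) → List Char × List (List Char)
  | [] => (nt, [])
  | h :: t => if nt.length < 25 then tgLoopA (nt ++ " - ".toList ++ h) t else (nt, h :: t)

def title_generator (title : String) (brand : String) (asin : String) : String × List String :=
  let t1 := PySem.Chars.replace title.toList ['('] []
  let t2 := PySem.Chars.replace t1 [')'] []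
  let t3 := PySem.Chars.replace t2 ['['] []
  let t4 := PySem.Chars.replace t3 [']'] []
  let segs := PySem.Chars.splitOn t4 ", ".toList
  match segs with
  | [] => ("", [])  -- unreachable: splitOn with a nonempty separator returns a nonempty list
  | s0 :: rest =>
    let p := tgLoopA s0 rest
    (String.ofList p.1, p.2.map String.ofList)

-- ===== PORT B =====
-- while acc < 25 and m + 1 < len(segments): acc += 3 + len(segments[m+1]); m += 1
def tgCutB (acc : Nat) : List (List Char) → Nat
  | [] => 0
  | h :: t => if acc < 25 then tgCutB (acc + 3 + h.length) t + 1 else 0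

def title_generator_alt (title : String) (brand : String) (asin : String) : String × List String :=
  let cleaned := "()[]".toList.foldl (fun s c => PySem.Chars.replace s [c] []) title.toList
  let segs := PySem.Chars.splitOn cleaned ", ".toList
  match segs with
  | [] => ("", [])  -- unreachable: splitOn with a nonempty separator returns a nonempty list
  | s0 :: rest =>
    let m := tgCutB s0.length rest
    (String.ofList (PySem.Chars.join " - ".toList (s0 :: rest.take m)),
     (rest.drop m).map String.ofList)

-- ===== PRECONDITION & SPEC =====
def Spec_title_generator (title : String) (brand : String) (asin : String) (out : String × List String) : Prop := out = title_generator_alt title brand asin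
instance (title : String) (brand : String) (asin : String) (out : String × List String) : Decidable (Spec_title_generator title brand asin out) := by unfold Spec_title_generator; infer_instance

-- ===== CLAIM (what is proved, stated in full; the proofs are below) =====
def Claim_equal_title_generator : Prop := ∀ (title : String) (brand : String) (asin : String), Dom_title_generator title brand asin → Spec_title_generator title brand asin (title_generator title brand asin)

-- ===== LEMMAS AND PROOFS =====

-- ===== VERDICT (by name: the statement is the Claim_ definition above) =====
-- joining after gluing a ++ sep ++ b into one part equals joining with b kept separate
lemma tg_join_glue (sep a b : List Char) (l : List (List Char)) :
    PySem.Chars.join sep ((a ++ sep ++ b) :: l) = a ++ sep ++ PySem.Chars.join sep (b :: l) := by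
  cases l with
  | nil => rw [PySem.Chars.join_singleton, PySem.Chars.join_singleton]
  | cons c l =>
    rw [PySem.Chars.join_cons_cons, PySem.Chars.join_cons_cons]
    simp [List.append_assoc]

-- A's merge loop computes exactly: join the first (cutoff+1) segments, drop the rest
lemma tgLoopA_eq (rest : List (List Char)) : ∀ (nt : List Char),
    tgLoopA nt rest =
      (PySem.Chars.join " - ".toList (nt :: rest.take (tgCutB nt.length rest)),
       rest.drop (tgCutB nt.length rest)) := by
  induction rest with
  | nil => intro nt; simp [tgLoopA, tgCutB, PySem.Chars.join_singleton]
  | cons h t ih =>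
    intro nt
    by_cases h25 : nt.length < 25
    · have hlen : (nt ++ " - ".toList ++ h).length = nt.length + 3 + h.length := by
        simp; omega
      simp only [tgLoopA, tgCutB, h25, if_pos, ih, hlen, List.take_succ_cons,
        List.drop_succ_cons]
      rw [tg_join_glue, PySem.Chars.join_cons_cons]
    · simp [tgLoopA, tgCutB, h25, PySem.Chars.join_singleton]

theorem title_generator_spec : Claim_equal_title_generator := by
  intro title brand asin _
  unfold Spec_title_generator title_generator title_generator_alt
  simp only [show "()[]".toList = ['(', ')', '[', ']'] from rfl, List.foldl]
  cases PySem.Chars.splitOn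
      (PySem.Chars.replace (PySem.Chars.replace (PySem.Chars.replace
        (PySem.Chars.replace title.toList ['('] []) [')'] []) ['['] []) [']'] [])
      ", ".toList with
  | nil => rfl
  | cons s0 rest => simp [tgLoopA_eq]
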